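-- pv_equiv track=rewrite | github.com/sophie727/MIT-6.009 | lab5_recipes/lab.py | combined_flat_recipes
-- ===== SOURCE A (Python) =====
-- def add_flat_recipes(flat_recipes):
--     """
--     Given a list of flat_recipe dictionaries that map food items to quantities,
--     return a new overall 'grocery list' dictionary that maps each ingredient name
--     to the sum of its quantities across the given flat recipes.
--
--     For example,
--         add_flat_recipes([{'milk':1, 'chocolate':1}, {'sugar':1, 'milk':2}])
--     should return:
--         {'milk':3, 'chocolate': 1, 'sugar': 1}
--     """
--     summed_flat_recipes = {}
--     for flat_recipe in flat_recipes:
--         for ingredient in flat_recipe: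
--             amt = flat_recipe[ingredient]
--             if ingredient in summed_flat_recipes:
--                 summed_flat_recipes[ingredient] += amt
--             else:
--                 summed_flat_recipes[ingredient] = amt
--     return summed_flat_recipes
--
-- def combined_flat_recipes(flat_recipes):
--     """
--     Given a list of lists of dictionaries, where each inner list represents all
--     the flat recipes for a certain ingredient, compute and return a list of flat
--     recipe dictionaries that represent all the possible combinations of
--     ingredient recipes.
--     """
--     # we'll calculate this recursively.
--
--     # base case
--     if not flat_recipes:
--         return []
--     if len(flat_recipes) == 1:
--         return flat_recipes[0]
--     # recursive case
--     combined = []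
--     ingredient1 = flat_recipes[0]
--     other_ingredients = combined_flat_recipes(flat_recipes[1:])
--     for ingredient1_method in ingredient1:
--         for other_method in other_ingredients:
--             combined.append(add_flat_recipes([ingredient1_method, other_method]))
--     return combined
-- ===== SOURCE B (Python) =====
-- def merge(a, b):
--     """Fresh dict holding the key-wise sum of two flat recipes."""
--     out = {}
--     for k, v in a.items():
--         out[k] = out.get(k, 0) + v
--     for k, v in b.items():
--         out[k] = out.get(k, 0) + v
--     return out
--
-- def combined_flat_recipes(flat_recipes):
--     if not flat_recipes:
--         return []
--     acc = flat_recipes[0]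
--     for options in flat_recipes[1:]:
--         acc = [merge(a, b) for a in acc for b in options]
--     return acc
-- ===== Notes on version B (the rewrite author's own statement) =====
-- stated objective: alternative
-- what changed: Replaces A's right-recursion on the list of option-lists (with a generic multi-dict summing helper applied pairwise) by an iterative left fold that rebuilds the accumulator with a list comprehension and a binary merge; equal output relies on associativity of the merge, proved in Lean.
import Mathlib
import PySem

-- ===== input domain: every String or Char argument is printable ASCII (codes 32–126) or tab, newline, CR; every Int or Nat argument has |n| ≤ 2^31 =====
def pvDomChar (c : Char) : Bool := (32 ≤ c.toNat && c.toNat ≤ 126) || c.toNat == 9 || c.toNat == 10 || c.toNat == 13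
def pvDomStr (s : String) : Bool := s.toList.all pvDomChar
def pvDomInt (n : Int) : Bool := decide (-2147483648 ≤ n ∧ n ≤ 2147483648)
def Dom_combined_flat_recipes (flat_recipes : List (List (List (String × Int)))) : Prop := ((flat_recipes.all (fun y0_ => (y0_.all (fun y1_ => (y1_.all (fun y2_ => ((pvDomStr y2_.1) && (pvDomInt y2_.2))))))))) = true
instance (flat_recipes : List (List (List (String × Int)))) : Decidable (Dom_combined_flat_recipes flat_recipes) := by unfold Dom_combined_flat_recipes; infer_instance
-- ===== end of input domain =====

-- B replaces A's right-recursion (and its generic multi-dict summing helper) by an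
-- iterative left fold over the option lists with a binary merge; same return value,
-- a different decomposition (objective: alternative, no speed claim).

-- ===== PORT A =====
-- helper add_flat_recipes: dicts are PySem.Dict; 'for ingredient in flat_recipe' walks
-- the dict's items, giving each key once with its value, exactly as Python's dict loop.
def add_flat_recipes (flat_recipes : List (List (String × Int))) : List (String × Int) :=
  (flat_recipes.foldl
    (fun summed flat_recipe =>
      flat_recipe.foldl
        (fun summed p =>
          if summed.contains p.1 then summed.insert p.1 (summed.getD p.1 0 + p.2)
          else summed.insert p.1 p.2)
        summed)
    PySem.Dict.empty).items

def combined_flat_recipes : List (List (List (String × Int))) → List (List (String × Int))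
  | [] => []
  | [x] => x
  | x :: y :: rest =>
    let other_ingredients := combined_flat_recipes (y :: rest)
    x.foldl
      (fun combined m1 =>
        other_ingredients.foldl (fun c m2 => c ++ [add_flat_recipes [m1, m2]]) combined)
      []

-- ===== PORT B =====
-- Source B's merge: out = {}; add a's items, then b's items, summing on shared keys.
def pvMergeInto (out : PySem.Dict String Int) (r : List (String × Int)) : PySem.Dict String Int :=
  r.foldl (fun out p => out.insert p.1 (out.getD p.1 0 + p.2)) out

def pyMerge (a b : List (String × Int)) : List (String × Int) :=
  (pvMergeInto (pvMergeInto PySem.Dict.empty a) b).items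

def combined_flat_recipes_alt : List (List (List (String × Int))) → List (List (String × Int))
  | [] => []
  | x :: rest =>
    rest.foldl (fun acc options => acc.flatMap (fun a => options.map (fun b => pyMerge a b))) x

-- ===== PRECONDITION & SPEC =====
def Spec_combined_flat_recipes (flat_recipes : List (List (List (String × Int)))) (out : List (List (String × Int))) : Prop := out = combined_flat_recipes_alt flat_recipes
instance (flat_recipes : List (List (List (String × Int)))) (out : List (List (String × Int))) : Decidable (Spec_combined_flat_recipes flat_recipes out) := by unfold Spec_combined_flat_recipes; infer_instance

-- ===== CLAIM (what is proved, stated in full; the proofs are below) =====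
def Claim_equal_combined_flat_recipes : Prop := ∀ (flat_recipes : List (List (List (String × Int)))), Dom_combined_flat_recipes flat_recipes → Spec_combined_flat_recipes flat_recipes (combined_flat_recipes flat_recipes)

-- ===== LEMMAS AND PROOFS =====

-- A's branchy update step is the uniform 'insert key (getD key 0 + amt)' step.
theorem pv_step_eq :
    (fun (s : PySem.Dict String Int) (p : String × Int) =>
      if s.contains p.1 then s.insert p.1 (s.getD p.1 0 + p.2) else s.insert p.1 p.2)
    = (fun s p => s.insert p.1 (s.getD p.1 0 + p.2)) := by
  funext s p
  by_cases h : s.contains p.1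
  · simp [h]
  · simp only [Bool.not_eq_true] at h
    simp [h, PySem.Dict.getD_of_not_contains s 0 h]

theorem add_two_eq_pyMerge (m1 m2 : List (String × Int)) :
    add_flat_recipes [m1, m2] = pyMerge m1 m2 := by
  simp only [add_flat_recipes, pyMerge, pvMergeInto, List.foldl, pv_step_eq]

-- sum of the values attached to key k in an item list
def pvKeyVals (l : List (String × Int)) (k : String) : Int :=
  ((l.filter (fun p => p.1 == k)).map (·.2)).sum

theorem pvKeyVals_of_not_mem (l : List (String × Int)) (k : String)
    (h : k ∉ l.map Prod.fst) : pvKeyVals l k = 0 := by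
  have : l.filter (fun p => p.1 == k) = [] := by
    rw [List.filter_eq_nil_iff]
    intro p hp hbeq
    exact h (List.mem_map.mpr ⟨p, hp, (eq_of_beq hbeq)⟩)
  simp [pvKeyVals, this]

theorem getD_pvMergeInto (l : List (String × Int)) (d : PySem.Dict String Int) (k : String) :
    (pvMergeInto d l).getD k 0 = d.getD k 0 + pvKeyVals l k := by
  induction l generalizing d with
  | nil => simp [pvMergeInto, pvKeyVals]
  | cons p rest ih =>
    rw [show pvMergeInto d (p :: rest) = pvMergeInto (d.insert p.1 (d.getD p.1 0 + p.2)) rest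
        from rfl, ih, PySem.Dict.getD_insert]
    by_cases hk : k = p.1
    · subst hk
      simp [pvKeyVals]
      ring
    · rw [if_neg hk]
      have hb : (p.1 == k) = false := beq_eq_false_iff_ne.mpr (fun h => hk h.symm)
      simp [pvKeyVals, hb]

theorem keys_pvMergeInto (l : List (String × Int)) (d : PySem.Dict String Int) :
    (pvMergeInto d l).keys = PySem.Set.update d.keys (l.map Prod.fst) :=
  PySem.Dict.keys_foldl_insert_key l Prod.fst (fun d x => d.getD x.1 0 + x.2) d

theorem nodup_keys_pvMergeInto (l : List (String × Int)) (d : PySem.Dict String Int)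
    (h : d.keys.Nodup) : (pvMergeInto d l).keys.Nodup :=
  PySem.Dict.nodup_keys_foldl_insert_key l Prod.fst (fun d x => d.getD x.1 0 + x.2) d h

theorem pvKeyVals_items (d : PySem.Dict String Int) (h : d.keys.Nodup) (k : String) :
    pvKeyVals d.items k = d.getD k 0 := by
  obtain ⟨items⟩ := d
  induction items with
  | nil => simp [pvKeyVals, PySem.Dict.getD_eq_get?_getD, PySem.Dict.get?]
  | cons p rest ih =>
    rw [show (PySem.Dict.mk (p :: rest) : PySem.Dict String Int).keys
          = p.1 :: (PySem.Dict.mk rest : PySem.Dict String Int).keys from rfl,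
      List.nodup_cons] at h
    rw [PySem.Dict.getD_eq_get?_getD, PySem.Dict.get?_mk_cons]
    by_cases hk : p.1 = k
    · have h0 : pvKeyVals rest k = 0 := pvKeyVals_of_not_mem rest k (hk ▸ h.1)
      subst hk
      simp [pvKeyVals] at h0 ⊢
      omega
    · have hb : (p.1 == k) = false := beq_eq_false_iff_ne.mpr hk
      have := ih h.2
      rw [PySem.Dict.getD_eq_get?_getD] at this
      simpa [pvKeyVals, List.filter_cons, hb] using this

theorem pv_dict_eq (d e : PySem.Dict String Int) (hd : d.keys.Nodup) (he : e.keys.Nodup)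
    (hk : d.keys = e.keys) (hv : ∀ k, d.getD k 0 = e.getD k 0) : d = e := by
  apply PySem.Dict.ext
  rw [PySem.Dict.items_eq_map_keys d hd 0, PySem.Dict.items_eq_map_keys e he 0, hk]
  exact List.map_congr_left (fun k _ => by simp [hv k])

theorem pv_update_ofList (s : PySem.Set String) (t : List String) :
    s.update (PySem.Set.ofList t) = s.update t := by
  rw [PySem.Set.update_eq_append_filter, PySem.Set.update_eq_append_filter,
    PySem.Set.ofList_ofList]

theorem pyMerge_assoc (a b c : List (String × Int)) :
    pyMerge (pyMerge a b) c = pyMerge a (pyMerge b c) := by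
  unfold pyMerge
  congr 1
  have hnd2 : ∀ (l m : List (String × Int)),
      (pvMergeInto (pvMergeInto PySem.Dict.empty l) m).keys.Nodup :=
    fun l m => nodup_keys_pvMergeInto m _
      (nodup_keys_pvMergeInto l _ PySem.Dict.nodup_keys_empty)
  have hkeys : ∀ (l m : List (String × Int)),
      (pvMergeInto (pvMergeInto PySem.Dict.empty l) m).keys
        = PySem.Set.ofList (l.map Prod.fst ++ m.map Prod.fst) := by
    intro l m
    rw [keys_pvMergeInto, keys_pvMergeInto, PySem.Dict.keys_empty,
      PySem.Set.update_nil_left, ← PySem.Set.ofList_append]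
  have hset1 : ∀ (X Y : List String),
      PySem.Set.ofList ((PySem.Set.ofList X : List String) ++ Y) = PySem.Set.ofList (X ++ Y) := by
    intro X Y
    rw [PySem.Set.ofList_append, PySem.Set.ofList_append, PySem.Set.ofList_ofList]
  have hset2 : ∀ (X Y : List String),
      PySem.Set.ofList (X ++ (PySem.Set.ofList Y : List String)) = PySem.Set.ofList (X ++ Y) := by
    intro X Y
    rw [PySem.Set.ofList_append, PySem.Set.ofList_append, pv_update_ofList]
  have hgetD : ∀ (l m : List (String × Int)) (k : String),
      (pvMergeInto (pvMergeInto PySem.Dict.empty l) m).getD k 0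
        = pvKeyVals l k + pvKeyVals m k := by
    intro l m k
    rw [getD_pvMergeInto, getD_pvMergeInto, PySem.Dict.getD_empty]
    ring
  apply pv_dict_eq
  · exact hnd2 _ _
  · exact hnd2 _ _
  · have hab : List.map Prod.fst (pvMergeInto (pvMergeInto PySem.Dict.empty a) b).items
        = PySem.Set.ofList (a.map Prod.fst ++ b.map Prod.fst) := hkeys a b
    have hbc : List.map Prod.fst (pvMergeInto (pvMergeInto PySem.Dict.empty b) c).items
        = PySem.Set.ofList (b.map Prod.fst ++ c.map Prod.fst) := hkeys b c
    rw [hkeys, hkeys, hab, hbc, hset1, hset2, List.append_assoc]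
  · intro k
    rw [hgetD, hgetD, pvKeyVals_items _ (hnd2 a b) k, pvKeyVals_items _ (hnd2 b c) k,
      hgetD, hgetD]
    ring

theorem combined_cons (x y : List (List (String × Int)))
    (rest : List (List (List (String × Int)))) :
    combined_flat_recipes (x :: y :: rest)
      = x.flatMap (fun m1 =>
          (combined_flat_recipes (y :: rest)).map (fun m2 => pyMerge m1 m2)) := by
  rw [combined_flat_recipes]
  simp only [PySem.List.foldl_append_singleton_eq_map, PySem.List.foldl_append_eq_flatMap,
    add_two_eq_pyMerge, List.nil_append]

theorem alt_foldl (rest : List (List (List (String × Int))))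
    (x : List (List (String × Int))) (h : rest ≠ []) :
    rest.foldl (fun acc options => acc.flatMap (fun a => options.map (fun b => pyMerge a b))) x
      = x.flatMap (fun a => (combined_flat_recipes rest).map (fun b => pyMerge a b)) := by
  induction rest generalizing x with
  | nil => exact absurd rfl h
  | cons o rest' ih =>
    cases rest' with
    | nil => simp [List.foldl, combined_flat_recipes]
    | cons y rest'' =>
      rw [List.foldl_cons, ih _ (by simp), combined_cons]
      simp only [List.flatMap_assoc, List.flatMap_map, List.map_flatMap, List.map_map,
        Function.comp_def, pyMerge_assoc]

-- ===== VERDICT (by name: the statement is the Claim_ definition above) =====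
theorem combined_flat_recipes_spec : Claim_equal_combined_flat_recipes := by
  intro flat_recipes _
  unfold Spec_combined_flat_recipes
  match flat_recipes with
  | [] => rfl
  | [x] => rfl
  | x :: y :: rest =>
    rw [combined_cons, combined_flat_recipes_alt, alt_foldl _ _ (by simp)]
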